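-- pv_equiv track=rewrite | github.com/yuzhu1778/LNP | lammps/calCGMass.py | CAmass
-- ===== SOURCE A (Python) =====
-- def CAmass(massMap,fastaSequence, boundary):
--
--     MList=[]
--
--     for i in range(len(boundary)):
--         mass=0
--         if(i==0):
--             for j in range(0,boundary[i]+1):
--                 mass=mass+massMap[fastaSequence[j]]
--         elif(i>0):
--             for j in range(boundary[i-1]+1,boundary[i]+1):
--                 mass=mass+massMap[fastaSequence[j]]
--         MList.append(mass)
--     return MList
-- ===== SOURCE B (Python) =====
-- def CAmass(massMap, fastaSequence, boundary):
--     if not boundary: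
--         return []
--     prefix = [0]
--     for ch in fastaSequence[: boundary[-1] + 1]:
--         prefix.append(prefix[-1] + massMap[ch])
--     MList = []
--     prev = 0
--     for b in boundary:
--         MList.append(prefix[b + 1] - prefix[prev])
--         prev = b + 1
--     return MList
-- ===== Notes on version B (the rewrite author's own statement) =====
-- stated objective: alternative
-- what changed: Replaces the per-segment inner accumulation loops indexed through boundary[i-1]/boundary[i] with one prefix-sum table built over fastaSequence[:boundary[-1]+1], each segment mass then being an O(1) difference of two prefix entries.
-- outside the precondition, e.g. on CAmass({'A': 1, 'B': 2}, 'AB', [1, 0]): A returns [3, 0], B raises IndexError; on CAmass({'A': 1}, 'AB', [-3]): A returns [0], B raises IndexError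
import Mathlib
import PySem

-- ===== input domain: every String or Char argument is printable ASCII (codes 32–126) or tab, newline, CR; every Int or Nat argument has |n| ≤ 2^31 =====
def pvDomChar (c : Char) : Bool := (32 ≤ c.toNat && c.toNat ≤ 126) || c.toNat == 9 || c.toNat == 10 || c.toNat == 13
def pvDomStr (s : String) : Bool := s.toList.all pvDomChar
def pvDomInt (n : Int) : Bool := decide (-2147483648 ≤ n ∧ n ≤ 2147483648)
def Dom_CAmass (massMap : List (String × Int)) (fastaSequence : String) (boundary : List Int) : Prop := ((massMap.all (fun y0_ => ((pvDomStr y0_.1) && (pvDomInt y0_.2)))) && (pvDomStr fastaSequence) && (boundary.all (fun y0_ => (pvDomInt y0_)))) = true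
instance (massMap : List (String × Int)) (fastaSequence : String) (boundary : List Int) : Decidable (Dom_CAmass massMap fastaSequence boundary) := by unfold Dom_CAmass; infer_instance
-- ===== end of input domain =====

-- B replaces A's per-segment accumulation loops with a prefix-sum table over the used
-- prefix of the sequence plus O(1) differences (objective: alternative decomposition,
-- same asymptotic cost).

-- fastaSequence[j] as a 1-character Python string (none of Str.pyGet? = IndexError; "" only outside Pre_)
def pvCharAt (s : String) (j : Int) : String :=
  match PySem.Str.pyGet? s j with
  | some c => String.ofList [c]
  | none => ""

-- massMap[key]; .getD 0 is only reached outside Pre_ (Python raises KeyError there)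
def pvLook (massMap : List (String × Int)) (key : String) : Int :=
  ((PySem.Dict.mk massMap).get? key).getD 0

-- ===== PORT A =====
def CAmass (massMap : List (String × Int)) (fastaSequence : String) (boundary : List Int) : List Int :=
  (PySem.List.pyRange 0 (boundary.length : Int) 1).foldl (fun MList i =>
    let mass : Int :=
      if i == 0 then
        (PySem.List.pyRange 0 (PySem.List.pyGetD boundary i 0 + 1) 1).foldl
          (fun mass j => mass + pvLook massMap (pvCharAt fastaSequence j)) 0
      else if i > 0 then
        (PySem.List.pyRange (PySem.List.pyGetD boundary (i - 1) 0 + 1) (PySem.List.pyGetD boundary i 0 + 1) 1).foldl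
          (fun mass j => mass + pvLook massMap (pvCharAt fastaSequence j)) 0
      else 0
    MList ++ [mass]) []

-- ===== PORT B =====
def CAmass_alt (massMap : List (String × Int)) (fastaSequence : String) (boundary : List Int) : List Int :=
  if boundary = [] then []
  else
    let pre := (PySem.Str.slice fastaSequence none (some (PySem.List.pyGetD boundary (-1) 0 + 1))).toList.foldl
      (fun pre ch => pre ++ [PySem.List.pyGetD pre (-1) 0 + pvLook massMap (String.ofList [ch])]) [0]
    (boundary.foldl (fun (st : List Int × Int) b =>
      (st.1 ++ [PySem.List.pyGetD pre (b + 1) 0 - PySem.List.pyGetD pre st.2 0], b + 1)) ([], 0)).1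

-- ===== PRECONDITION & SPEC =====
-- Pre_ is the task's natural domain: a nondecreasing list of segment-end indices, each in
-- [-1, len(fastaSequence)), with every residue up to the last boundary present in massMap.
-- It excludes inputs where Python A raises (index out of range / missing key) and, beyond
-- those, decreasing boundaries and boundaries below -1, on which A still returns (0 for the
-- inverted/empty segment, or a negative-index wraparound sum) but where B raises: those
-- return values are accidents of A's range arithmetic, not part of the task.
def Pre_CAmass (massMap : List (String × Int)) (fastaSequence : String) (boundary : List Int) : Prop :=
  boundary.Pairwise (· ≤ ·) ∧
  (∀ b ∈ boundary, -1 ≤ b ∧ b < (fastaSequence.toList.length : Int)) ∧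
  (∀ b ∈ boundary, ∀ j : Nat, j < fastaSequence.toList.length → (j : Int) ≤ b →
    (((PySem.Dict.mk massMap).get? (String.ofList [fastaSequence.toList.getD j ' '])).isSome = true))

instance (massMap : List (String × Int)) (fastaSequence : String) (boundary : List Int) : Decidable (Pre_CAmass massMap fastaSequence boundary) := by
  unfold Pre_CAmass; infer_instance

def pvWitness_CAmass : (List (String × Int)) × String × List Int :=
  ([("A", 71), ("G", 57)], "AGA", [0, 2])

def Spec_CAmass (massMap : List (String × Int)) (fastaSequence : String) (boundary : List Int) (out : List Int) : Prop := out = CAmass_alt massMap fastaSequence boundary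
instance (massMap : List (String × Int)) (fastaSequence : String) (boundary : List Int) (out : List Int) : Decidable (Spec_CAmass massMap fastaSequence boundary out) := by unfold Spec_CAmass; infer_instance

-- ===== CLAIM (what is proved, stated in full; the proofs are below) =====
def Claim_equal_CAmass : Prop := ∀ (massMap : List (String × Int)) (fastaSequence : String) (boundary : List Int), Dom_CAmass massMap fastaSequence boundary → Pre_CAmass massMap fastaSequence boundary → Spec_CAmass massMap fastaSequence boundary (CAmass massMap fastaSequence boundary)

-- ===== LEMMAS AND PROOFS =====

-- P cs g k = sum of g over the first k entries of cs (the mathematical prefix sum)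
def pvP (cs : List Char) (g : Char → Int) (k : Nat) : Int := ((cs.take k).map g).sum

-- the reference result: segment sums written as differences of the prefix function
def pvRef (cs : List Char) (g : Char → Int) (prev : Int) : List Int → List Int
  | [] => []
  | b :: bs => (pvP cs g (b + 1).toNat - pvP cs g prev.toNat) :: pvRef cs g (b + 1) bs

-- abbreviation used throughout: the mass of one residue character
def pvG (massMap : List (String × Int)) (c : Char) : Int := pvLook massMap (String.ofList [c])

theorem pvG_def (massMap : List (String × Int)) (c : Char) :
    pvLook massMap (String.ofList [c]) = pvG massMap c := rfl

theorem pvP_succ (cs : List Char) (g : Char → Int) (k : Nat) (hk : k < cs.length) :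
    pvP cs g (k + 1) = pvP cs g k + g cs[k] := by
  unfold pvP
  rw [List.map_take, List.map_take, List.sum_take_succ _ k (by simpa using hk)]
  simp

theorem pvSumAux (massMap : List (String × Int)) (fasta : String) :
    ∀ (e : Nat), e ≤ fasta.toList.length → ∀ s : Nat, s ≤ e →
    ((PySem.List.pyRange (s : Int) (e : Int) 1).map
        (fun j => pvLook massMap (pvCharAt fasta j))).sum
      = pvP fasta.toList (pvG massMap) e - pvP fasta.toList (pvG massMap) s := by
  intro e
  induction e with
  | zero =>
    intro _ s hs
    have hs0 : s = 0 := by omega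
    subst hs0
    simp [PySem.List.pyRange_one_eq_nil (le_refl (0 : Int))]
  | succ e ih =>
    intro he s hs
    by_cases hcase : s = e + 1
    · subst hcase
      rw [PySem.List.pyRange_one_eq_nil (le_refl _)]
      simp
    · have hs' : s ≤ e := by omega
      have hlt : e < fasta.toList.length := by omega
      have hcast : ((e + 1 : Nat) : Int) = (e : Int) + 1 := by push_cast; ring
      rw [hcast, PySem.List.pyRange_one_succ_right (by exact_mod_cast hs')]
      rw [List.map_append, List.sum_append, ih (by omega) s hs']
      have hchar : pvCharAt fasta ((e : Nat) : Int) = String.ofList [fasta.toList[e]] := by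
        unfold pvCharAt
        rw [PySem.Str.pyGet?_natCast, List.getElem?_eq_getElem hlt]
      rw [pvP_succ _ _ e hlt]
      simp [hchar, pvG, pvLook]
      ring

theorem pvSeg (massMap : List (String × Int)) (fasta : String) (s e : Nat)
    (hse : s ≤ e) (he : e ≤ fasta.toList.length) :
    (PySem.List.pyRange (s : Int) (e : Int) 1).foldl
        (fun mass j => mass + pvLook massMap (pvCharAt fasta j)) 0
      = pvP fasta.toList (pvG massMap) e - pvP fasta.toList (pvG massMap) s := by
  rw [PySem.List.foldl_add, pvSumAux massMap fasta e he s hse]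
  ring

theorem pvSegI (massMap : List (String × Int)) (fasta : String) (s e : Int)
    (h0 : 0 ≤ s) (hse : s ≤ e) (he : e ≤ (fasta.toList.length : Int)) :
    (PySem.List.pyRange s e 1).foldl
        (fun mass j => mass + pvLook massMap (pvCharAt fasta j)) 0
      = pvP fasta.toList (pvG massMap) e.toNat - pvP fasta.toList (pvG massMap) s.toNat := by
  have h := pvSeg massMap fasta s.toNat e.toNat (by omega) (by omega)
  rw [show ((s.toNat : Nat) : Int) = s from Int.toNat_of_nonneg h0,
    show ((e.toNat : Nat) : Int) = e from Int.toNat_of_nonneg (by omega)] at h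
  exact h

theorem pvRef_length (cs : List Char) (g : Char → Int) (bs : List Int) :
    ∀ prev : Int, (pvRef cs g prev bs).length = bs.length := by
  induction bs with
  | nil => intro prev; simp [pvRef]
  | cons b bs ih => intro prev; simp [pvRef, ih]

theorem pvRef_getElem (cs : List Char) (g : Char → Int) (bs : List Int) :
    ∀ (prev : Int) (k : Nat) (hk : k < bs.length),
    (pvRef cs g prev bs)[k]'(by rw [pvRef_length]; exact hk)
      = pvP cs g (bs[k] + 1).toNat
        - pvP cs g (if hk0 : k = 0 then prev.toNat else (bs[k - 1]'(by omega) + 1).toNat) := by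
  induction bs with
  | nil => intro prev k hk; simp at hk
  | cons b bs ih =>
    intro prev k hk
    cases k with
    | zero => simp [pvRef]
    | succ k =>
      have hk' : k < bs.length := by simpa using hk
      simp only [pvRef, List.getElem_cons_succ]
      rw [ih (b + 1) k hk']
      cases k with
      | zero => simp
      | succ k => simp

theorem pvLe_getLast (bs : List Int) (hch : bs.Pairwise (· ≤ ·)) (hne : bs ≠ []) :
    ∀ b ∈ bs, b ≤ bs.getLast hne := by
  intro b hb
  rw [List.mem_iff_getElem] at hb
  obtain ⟨i, hi, rfl⟩ := hb
  rw [List.getLast_eq_getElem]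
  rcases Nat.lt_or_ge i (bs.length - 1) with h | h
  · exact (List.pairwise_iff_getElem.mp hch) i (bs.length - 1) hi (by omega) h
  · have : i = bs.length - 1 := by omega
    subst this; exact le_refl _

theorem pvA_eq_ref (massMap : List (String × Int)) (fasta : String) (boundary : List Int)
    (hpre : Pre_CAmass massMap fasta boundary) :
    CAmass massMap fasta boundary
      = pvRef fasta.toList (pvG massMap) 0 boundary := by
  obtain ⟨hchain, hbnd, -⟩ := hpre
  simp only [CAmass]
  rw [PySem.List.foldl_append_singleton_eq_map, List.nil_append,
    PySem.List.pyRange_zero_nat boundary.length, List.map_map]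
  apply List.ext_getElem
  · simp [pvRef_length]
  · intro k h1 h2
    have hk : k < boundary.length := by simpa using h1
    rw [pvRef_getElem fasta.toList (pvG massMap) boundary 0 k hk]
    simp only [List.getElem_map, List.getElem_range, Function.comp_apply]
    have hbk := hbnd boundary[k] (List.getElem_mem hk)
    cases k with
    | zero =>
      simp only [Nat.cast_zero, beq_self_eq_true, if_true]
      rw [show PySem.List.pyGetD boundary (0 : Int) 0 = boundary[0] by
        rw [show ((0 : Int)) = ((0 : Nat) : Int) by norm_num, PySem.List.pyGetD_natCast,
          List.getD_eq_getElem?_getD, List.getElem?_eq_getElem hk]; rfl]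
      rw [pvSegI massMap fasta 0 (boundary[0] + 1) (by omega) (by omega) (by omega)]
      simp
    | succ k' =>
      have hne : (((k' + 1 : Nat) : Int) == (0 : Int)) = false := by
        simp; omega
      have hpos : (0 : Int) < ((k' + 1 : Nat) : Int) := by exact_mod_cast Nat.succ_pos k'
      simp only [hne, Bool.false_eq_true, if_false, if_pos hpos]
      have hk1 : k' < boundary.length := by omega
      have hbk' := hbnd boundary[k'] (List.getElem_mem hk1)
      have hmono : boundary[k'] ≤ boundary[k' + 1] :=
        (List.pairwise_iff_getElem.mp hchain) k' (k' + 1) hk1 hk (Nat.lt_succ_self k')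
      rw [show ((k' + 1 : Nat) : Int) - 1 = ((k' : Nat) : Int) by push_cast; ring]
      rw [show PySem.List.pyGetD boundary ((k' : Nat) : Int) 0 = boundary[k'] by
        rw [PySem.List.pyGetD_natCast, List.getD_eq_getElem?_getD,
          List.getElem?_eq_getElem hk1]; rfl]
      rw [show PySem.List.pyGetD boundary ((k' + 1 : Nat) : Int) 0 = boundary[k' + 1] by
        rw [PySem.List.pyGetD_natCast, List.getD_eq_getElem?_getD,
          List.getElem?_eq_getElem hk]; rfl]
      rw [pvSegI massMap fasta (boundary[k'] + 1) (boundary[k' + 1] + 1)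
        (by omega) (by omega) (by omega)]
      simp

theorem pvPrefixFold (g : Char → Int) :
    ∀ (cs : List Char) (acc : List Int) (h : acc ≠ []),
    cs.foldl (fun pre ch => pre ++ [PySem.List.pyGetD pre (-1) 0 + g ch]) acc
      = acc ++ (List.range cs.length).map
          (fun k => acc.getLast h + ((cs.take (k + 1)).map g).sum) := by
  intro cs
  induction cs with
  | nil => intro acc h; simp
  | cons c cs ih =>
    intro acc h
    rw [List.foldl_cons, PySem.List.pyGetD_neg_one acc 0 h]
    rw [ih (acc ++ [acc.getLast h + g c]) (by simp)]
    rw [List.append_assoc]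
    congr 1
    rw [List.length_cons, List.range_succ_eq_map, List.map_cons, List.map_map]
    simp [Function.comp, add_assoc]

theorem pvLookupPrefix (cs : List Char) (g : Char → Int) (N : Nat) (t : Int)
    (h0 : 0 ≤ t) (ht : t ≤ (N : Int)) :
    PySem.List.pyGetD ((0 : Int) :: (List.range N).map (fun k => pvP cs g (k + 1))) t 0
      = pvP cs g t.toNat := by
  rw [show t = ((t.toNat : Nat) : Int) from (Int.toNat_of_nonneg h0).symm,
    PySem.List.pyGetD_natCast, Int.toNat_natCast]
  have hmN : t.toNat ≤ N := by omega
  generalize t.toNat = m at hmN ⊢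
  rcases m with - | m
  · simp [pvP]
  · have hm : m < N := by omega
    rw [List.getD_cons_succ]
    simp [List.getD, hm]

theorem pvBFold (pre' : List Int) (cs : List Char) (g : Char → Int) (N : Nat)
    (hlook : ∀ t : Int, 0 ≤ t → t ≤ (N : Int) → PySem.List.pyGetD pre' t 0 = pvP cs g t.toNat) :
    ∀ (bs : List Int) (acc : List Int) (prev : Int), 0 ≤ prev → prev ≤ (N : Int) →
    (∀ b ∈ bs, -1 ≤ b ∧ b + 1 ≤ (N : Int)) →
    (bs.foldl (fun (st : List Int × Int) b =>
        (st.1 ++ [PySem.List.pyGetD pre' (b + 1) 0 - PySem.List.pyGetD pre' st.2 0], b + 1))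
      (acc, prev)).1
      = acc ++ pvRef cs g prev bs := by
  intro bs
  induction bs with
  | nil => intro acc prev _ _ _; simp [pvRef]
  | cons b bs ih =>
    intro acc prev hp0 hpN hmem
    obtain ⟨hb1, hb2⟩ := hmem b List.mem_cons_self
    rw [List.foldl_cons]
    rw [ih (acc ++ [PySem.List.pyGetD pre' (b + 1) 0 - PySem.List.pyGetD pre' prev 0]) (b + 1)
      (by omega) hb2 (fun x hx => hmem x (List.mem_cons_of_mem b hx))]
    rw [hlook (b + 1) (by omega) hb2, hlook prev hp0 hpN]
    simp [pvRef]

theorem pvAlt_eq_ref (massMap : List (String × Int)) (fasta : String) (boundary : List Int)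
    (hpre : Pre_CAmass massMap fasta boundary) :
    CAmass_alt massMap fasta boundary
      = pvRef fasta.toList (pvG massMap) 0 boundary := by
  obtain ⟨hchain, hbnd, -⟩ := hpre
  by_cases hnil : boundary = []
  · subst hnil; simp [CAmass_alt, pvRef]
  · simp only [CAmass_alt, if_neg hnil, pvG_def]
    have hL := PySem.List.pyGetD_neg_one boundary 0 hnil
    set L := boundary.getLast hnil with hLdef
    have hLmem : L ∈ boundary := List.getLast_mem hnil
    have hLb := hbnd L hLmem
    have hLmax : ∀ b ∈ boundary, b ≤ L := pvLe_getLast boundary hchain hnil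
    rw [hL]
    have hslice : (PySem.Str.slice fasta none (some (L + 1))).toList
        = fasta.toList.take (L + 1).toNat := by
      simp [PySem.Str.slice]
      rw [PySem.List.slice_to _ (by omega)]
    rw [hslice]
    set N : Nat := (L + 1).toNat with hNdef
    have hNlen : N ≤ fasta.toList.length := by omega
    have hNI : (N : Int) = L + 1 := by omega
    rw [pvPrefixFold (pvG massMap) (fasta.toList.take N) [0] (by simp)]
    have htklen : (fasta.toList.take N).length = N := by rw [List.length_take]; omega
    have hcanon : (List.range (fasta.toList.take N).length).map
        (fun k => ([ (0 : Int) ].getLast (by simp)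
          + (((fasta.toList.take N).take (k + 1)).map (pvG massMap)).sum))
        = (List.range N).map (fun k => pvP fasta.toList (pvG massMap) (k + 1)) := by
      rw [htklen]
      apply List.map_congr_left
      intro k hk
      rw [List.mem_range] at hk
      rw [List.take_take]
      simp [pvP, Nat.min_eq_left (by omega : k + 1 ≤ N)]
    rw [hcanon, List.singleton_append]
    rw [pvBFold ((0 : Int) :: (List.range N).map (fun k => pvP fasta.toList (pvG massMap) (k + 1)))
      fasta.toList (pvG massMap) N
      (fun t h0 ht => pvLookupPrefix fasta.toList (pvG massMap) N t h0 ht)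
      boundary [] 0 (le_refl 0) (by omega)
      (fun b hb => ⟨(hbnd b hb).1, by have := hLmax b hb; omega⟩)]
    simp

-- ===== VERDICT (by name: the statement is the Claim_ definition above) =====
theorem CAmass_spec : Claim_equal_CAmass := by
  intro massMap fasta boundary _ hpre
  unfold Spec_CAmass
  rw [pvA_eq_ref massMap fasta boundary hpre, pvAlt_eq_ref massMap fasta boundary hpre]
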